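-- pv_equiv track=rewrite | github.com/Sergey-Tkachenko/yandex_algo_practice | div_B/homework_2/task_C/task_C.py | countassym
-- ===== SOURCE A (Python) =====
-- def countassym(seq):
--     n = len(seq)
--     if n == 0:
--         return 0
--     else:
--         cnt = 0
--         for i in range(n // 2):
--             if seq[i] != seq[n - 1 - i]:
--                 cnt += 1
--
--         return cnt
-- ===== SOURCE B (Python) =====
-- def countassym(seq):
--     n = len(seq)
--
--     def go(lo, hi):
--         # number of mismatched mirror pairs (seq[i], seq[n-1-i]) for i in [lo, hi)
--         if hi - lo == 0:
--             return 0
--         if hi - lo == 1: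
--             return int(seq[lo] != seq[n - 1 - lo])
--         mid = (lo + hi) // 2
--         return go(lo, mid) + go(mid, hi)
--
--     return go(0, n // 2)
-- ===== Notes on version B (the rewrite author's own statement) =====
-- stated objective: alternative
-- what changed: Replaces A's linear half-range loop with a divide-and-conquer recursion that splits the pair-index range [0, n//2) in halves and sums the mismatch counts of the two subranges.
import Mathlib
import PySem

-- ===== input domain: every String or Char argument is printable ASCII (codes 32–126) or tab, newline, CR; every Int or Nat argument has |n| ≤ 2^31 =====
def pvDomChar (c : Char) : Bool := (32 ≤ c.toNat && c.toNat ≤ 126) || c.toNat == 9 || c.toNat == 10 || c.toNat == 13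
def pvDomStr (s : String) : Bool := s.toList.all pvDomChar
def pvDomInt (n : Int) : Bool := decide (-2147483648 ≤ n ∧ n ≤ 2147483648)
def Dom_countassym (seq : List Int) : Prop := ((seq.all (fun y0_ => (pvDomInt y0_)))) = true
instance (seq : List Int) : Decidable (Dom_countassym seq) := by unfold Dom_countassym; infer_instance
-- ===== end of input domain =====

-- B replaces A's linear half-range loop with a divide-and-conquer recursion that
-- splits the pair-index range [0, n//2) in halves and sums the two subcounts (alternative decomposition, same cost).


-- ===== PORT A =====
def countassym (seq : List Int) : Int :=
  let n : Int := (seq.length : Int)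
  if n = 0 then 0
  else
    (PySem.List.pyRange 0 (PySem.Int.floordiv n 2) 1).foldl
      (fun cnt i =>
        if PySem.List.pyGetD seq i 0 ≠ PySem.List.pyGetD seq (n - 1 - i) 0 then cnt + 1 else cnt)
      0

-- ===== PORT B =====
-- inner recursion go(lo, hi) of Source B; the extra Nat argument is FUEL making the
-- recursion total in Lean (never exhausted on the calls countassym_alt makes)
def pvGo (seq : List Int) (n : Int) : Nat → Int → Int → Int
  | 0, _, _ => 0
  | fuel + 1, lo, hi =>
    if hi - lo = 0 then 0
    else if hi - lo = 1 then
      if PySem.List.pyGetD seq lo 0 ≠ PySem.List.pyGetD seq (n - 1 - lo) 0 then 1 else 0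
    else
      let mid := PySem.Int.floordiv (lo + hi) 2
      pvGo seq n fuel lo mid + pvGo seq n fuel mid hi

def countassym_alt (seq : List Int) : Int :=
  let n : Int := (seq.length : Int)
  pvGo seq n ((PySem.Int.floordiv n 2).toNat + 1) 0 (PySem.Int.floordiv n 2)

-- ===== PRECONDITION & SPEC =====
def Spec_countassym (seq : List Int) (out : Int) : Prop := out = countassym_alt seq
instance (seq : List Int) (out : Int) : Decidable (Spec_countassym seq out) := by unfold Spec_countassym; infer_instance

-- ===== CLAIM (what is proved, stated in full; the proofs are below) =====
def Claim_equal_countassym : Prop := ∀ (seq : List Int), Dom_countassym seq → Spec_countassym seq (countassym seq)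

-- ===== LEMMAS AND PROOFS =====

-- the 0/1 indicator of an asymmetric position i of seq
def pvInd (seq : List Int) (i : Nat) : Int :=
  if seq.getD i 0 ≠ seq.getD (seq.length - 1 - i) 0 then 1 else 0

lemma countP_range_sum (p : Nat → Bool) (n : Nat) :
    (((List.range n).countP p : Nat) : Int) = ∑ i ∈ Finset.range n, (if p i then (1 : Int) else 0) := by
  induction n with
  | zero => simp
  | succ n ih =>
      rw [List.range_succ, List.countP_append, Finset.sum_range_succ, ← ih]
      by_cases h : p n <;> simp [h]

-- A computes the sum of indicators over the first half of the indices
lemma countassym_eq_half_sum (seq : List Int) :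
    countassym seq = ∑ i ∈ Finset.range (seq.length / 2), pvInd seq i := by
  unfold countassym
  by_cases h0 : seq.length = 0
  · simp [h0]
  · simp only [h0, Nat.cast_eq_zero]
    rw [show (2 : Int) = ((2 : Nat) : Int) from rfl, PySem.Int.floordiv_natCast,
      PySem.List.pyRange_zero_natCast, List.foldl_map]
    have hfun : ∀ (cnt : Int) (i : Nat),
        (if PySem.List.pyGetD seq (i : Int) 0 ≠ PySem.List.pyGetD seq ((seq.length : Int) - 1 - i) 0
          then cnt + 1 else cnt) =
        (if (decide (PySem.List.pyGetD seq (i : Int) 0 ≠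
              PySem.List.pyGetD seq ((seq.length : Int) - 1 - i) 0)) = true
          then cnt + 1 else cnt) := by
      intro cnt i; simp only [decide_eq_true_eq]
    simp only [if_false, hfun]
    rw [PySem.List.foldl_count_if, zero_add, countP_range_sum]
    apply Finset.sum_congr rfl
    intro i hi
    rw [Finset.mem_range] at hi
    have hcast : ((seq.length : Int) - 1 - (i : Int)) = ((seq.length - 1 - i : Nat) : Int) := by
      omega
    rw [hcast]
    simp [pvInd, PySem.List.pyGetD_natCast]

-- B's divide-and-conquer computes the indicator sum over the index interval [lo, hi)
lemma pvGo_eq_sum (seq : List Int) (fuel : Nat) :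
    ∀ (lo hi : Int), 0 ≤ lo → lo ≤ hi → hi ≤ (seq.length : Int) / 2 → (hi - lo).toNat < fuel →
      pvGo seq (seq.length : Int) fuel lo hi = ∑ i ∈ Finset.Ico lo.toNat hi.toNat, pvInd seq i := by
  induction fuel with
  | zero => intro lo hi _ _ _ hf; omega
  | succ fuel ih =>
      intro lo hi hlo hlh hhi _
      by_cases h0 : hi - lo = 0
      · have : lo.toNat = hi.toNat := by omega
        simp [pvGo, h0, this]
      · by_cases h1 : hi - lo = 1
        · have hlen : lo < (seq.length : Int) := by omega
          have hcast1 : lo = ((lo.toNat : Nat) : Int) := by omega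
          have hcast2 : (seq.length : Int) - 1 - lo = ((seq.length - 1 - lo.toNat : Nat) : Int) := by
            omega
          have hd : hi.toNat - lo.toNat = 1 := by omega
          rw [Finset.sum_Ico_eq_sum_range, hd, Finset.sum_range_one]
          simp only [pvGo, h1]
          rw [hcast2, hcast1, PySem.List.pyGetD_natCast, PySem.List.pyGetD_natCast]
          simp [pvInd]
          rw [max_eq_left hlo]
        · have h2 : 2 ≤ hi - lo := by omega
          have hmid : PySem.Int.floordiv (lo + hi) 2 = (lo + hi) / 2 :=
            PySem.Int.floordiv_eq_ediv_of_pos (by norm_num)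
          simp only [pvGo, h0, h1, if_false, hmid]
          set mid := (lo + hi) / 2 with hmiddef
          have hb1 : lo + 1 ≤ mid := by omega
          have hb2 : mid ≤ hi - 1 := by omega
          rw [ih lo mid hlo (by omega) (by omega) (by omega),
            ih mid hi (by omega) (by omega) hhi (by omega),
            Finset.sum_Ico_consecutive _ (by omega : lo.toNat ≤ mid.toNat) (by omega : mid.toNat ≤ hi.toNat)]

-- ===== VERDICT (by name: the statement is the Claim_ definition above) =====
theorem countassym_spec : Claim_equal_countassym := by
  intro seq _
  unfold Spec_countassym countassym_alt
  simp only
  have hfd : PySem.Int.floordiv ((seq.length : Int)) 2 = ((seq.length : Int)) / 2 :=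
    PySem.Int.floordiv_eq_ediv_of_pos (by norm_num)
  rw [hfd, pvGo_eq_sum seq _ 0 (((seq.length : Int)) / 2) le_rfl (by omega) le_rfl (by omega)]
  rw [countassym_eq_half_sum]
  have : (((seq.length : Int)) / 2).toNat = seq.length / 2 := by omega
  rw [this, show (Int.toNat 0) = 0 from rfl, ← Finset.range_eq_Ico]
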